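-- pv_equiv track=rewrite | github.com/m2-bayomy/tell-me-DSP- | src/voice_registry.py | _build_gender_pools
-- ===== SOURCE A (Python) =====
-- from typing import Dict, List, Set, Tuple, Optional
--
-- def _build_gender_pools(
--     free_voices: List[Dict],
--     reserved_voice_ids: Set[str],
-- ) -> Tuple[List[str], List[str], List[str]]:
--     male = []
--     female = []
--     neutral = []
--     for v in free_voices:
--         vid = v["id"]
--         if vid in reserved_voice_ids:
--             continue
--         g = v.get("gender", "neutral")
--         if g == "female":
--             female.append(vid)
--         elif g == "male":
--             male.append(vid)
--         else:
--             neutral.append(vid)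
--     return male, female, neutral
-- ===== SOURCE B (Python) =====
-- from typing import Dict, List, Set, Tuple
--
-- def _build_gender_pools(
--     free_voices: List[Dict],
--     reserved_voice_ids: Set[str],
-- ) -> Tuple[List[str], List[str], List[str]]:
--     # Stage 1: tag every eligible voice with its normalized pool key.
--     pairs = []
--     for v in free_voices:
--         vid = v["id"]
--         if vid not in reserved_voice_ids:
--             g = v.get("gender", "neutral")
--             pairs.append((g if g in ("male", "female") else "neutral", vid))
--     # Stage 2: group the tagged ids by key with a dictionary of lists.
--     pools = {}
--     for key, vid in pairs:
--         pools.setdefault(key, []).append(vid)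
--     return pools.get("male", []), pools.get("female", []), pools.get("neutral", [])
-- ===== Notes on version B (the rewrite author's own statement) =====
-- stated objective: alternative
-- what changed: B is a two-stage pipeline: it first tags each eligible voice with a normalized pool key into a (key, id) pair list, then groups the pairs with a dictionary of lists read out by key, replacing A's single loop over three named accumulators with an if/elif gender dispatch.
import Mathlib
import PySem

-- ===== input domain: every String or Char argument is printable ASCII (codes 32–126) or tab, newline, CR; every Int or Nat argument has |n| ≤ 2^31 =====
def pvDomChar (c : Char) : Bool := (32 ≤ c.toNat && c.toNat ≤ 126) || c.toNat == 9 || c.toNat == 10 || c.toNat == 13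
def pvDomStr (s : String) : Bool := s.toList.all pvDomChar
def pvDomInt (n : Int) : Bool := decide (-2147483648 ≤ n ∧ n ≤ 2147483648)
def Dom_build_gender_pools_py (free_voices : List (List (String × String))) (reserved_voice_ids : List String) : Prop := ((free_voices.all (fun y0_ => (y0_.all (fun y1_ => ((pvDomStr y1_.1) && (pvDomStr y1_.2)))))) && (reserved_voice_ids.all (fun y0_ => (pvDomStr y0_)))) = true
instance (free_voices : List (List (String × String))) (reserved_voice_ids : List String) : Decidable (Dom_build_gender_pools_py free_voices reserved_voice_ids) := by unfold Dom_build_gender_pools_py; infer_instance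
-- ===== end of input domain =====

-- B replaces A's single loop over three named accumulators (if/elif gender dispatch) by a
-- two-stage pipeline: tag eligible voices with a normalized pool key, then group the pairs
-- with a dictionary of lists read out by key (objective: alternative, same O(n) cost).


-- ===== PORT A =====
-- one loop, three accumulators, exactly A's branch order
def bgpStepA (reserved_voice_ids : List String)
    (acc : List String × List String × List String) (v : List (String × String)) :
    List String × List String × List String :=
  match (PySem.Dict.mk v).get? "id" with       -- v["id"]; none = KeyError, excluded by Pre_
  | none => acc
  | some vid =>
    if reserved_voice_ids.contains vid then acc
    else
      let g := (PySem.Dict.mk v).getD "gender" "neutral"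
      if g == "female" then (acc.1, acc.2.1 ++ [vid], acc.2.2)
      else if g == "male" then (acc.1 ++ [vid], acc.2.1, acc.2.2)
      else (acc.1, acc.2.1, acc.2.2 ++ [vid])

def build_gender_pools_py (free_voices : List (List (String × String))) (reserved_voice_ids : List String) : List String × List String × List String :=
  free_voices.foldl (bgpStepA reserved_voice_ids) ([], [], [])

-- ===== PORT B =====
-- stage 1 of Source B: the tagged (key, id) pair list
def bgpPairs (reserved_voice_ids : List String) (free_voices : List (List (String × String))) :
    List (String × String) :=
  free_voices.foldl (fun acc v =>
    let vid := ((PySem.Dict.mk v).get? "id").getD ""   -- v["id"]; the none case is outside Pre_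
    if reserved_voice_ids.contains vid then acc
    else
      let g := (PySem.Dict.mk v).getD "gender" "neutral"
      acc ++ [(if g == "male" || g == "female" then g else "neutral", vid)]) []

def build_gender_pools_py_alt (free_voices : List (List (String × String))) (reserved_voice_ids : List String) : List String × List String × List String :=
  let pairs := bgpPairs reserved_voice_ids free_voices
  -- stage 2: pools.setdefault(key, []).append(vid) == pools[key] = pools.get(key, []) + [vid] (PySem.Dict.modify)
  let pools := pairs.foldl (fun d p => d.modify p.1 [] (· ++ [p.2])) PySem.Dict.empty
  (pools.getD "male" [], pools.getD "female" [], pools.getD "neutral" [])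

-- ===== PRECONDITION & SPEC =====
-- Pre_ excludes voices without an "id" key, on which Python A raises KeyError.
def Pre_build_gender_pools_py (free_voices : List (List (String × String))) (_reserved_voice_ids : List String) : Prop :=
  free_voices.all (fun v => ((PySem.Dict.mk v).get? "id").isSome) = true
instance (free_voices : List (List (String × String))) (reserved_voice_ids : List String) : Decidable (Pre_build_gender_pools_py free_voices reserved_voice_ids) := by unfold Pre_build_gender_pools_py; infer_instance

def pvWitness_build_gender_pools_py : (List (List (String × String))) × List String :=
  ([[("id", "a"), ("gender", "male")], [("id", "b"), ("gender", "female")], [("id", "c")]], ["b"])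

def Spec_build_gender_pools_py (free_voices : List (List (String × String))) (reserved_voice_ids : List String) (out : List String × List String × List String) : Prop := out = build_gender_pools_py_alt free_voices reserved_voice_ids
instance (free_voices : List (List (String × String))) (reserved_voice_ids : List String) (out : List String × List String × List String) : Decidable (Spec_build_gender_pools_py free_voices reserved_voice_ids out) := by unfold Spec_build_gender_pools_py; infer_instance

-- ===== CLAIM (what is proved, stated in full; the proofs are below) =====
def Claim_equal_build_gender_pools_py : Prop := ∀ (free_voices : List (List (String × String))) (reserved_voice_ids : List String), Dom_build_gender_pools_py free_voices reserved_voice_ids → Pre_build_gender_pools_py free_voices reserved_voice_ids → Spec_build_gender_pools_py free_voices reserved_voice_ids (build_gender_pools_py free_voices reserved_voice_ids)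

-- ===== LEMMAS AND PROOFS =====
-- stage-1 fold from an arbitrary accumulator only appends
lemma bgpPairs_from (res : List String) (fv : List (List (String × String)))
    (acc : List (String × String)) :
    fv.foldl (fun acc v =>
      let vid := ((PySem.Dict.mk v).get? "id").getD ""
      if res.contains vid then acc
      else
        let g := (PySem.Dict.mk v).getD "gender" "neutral"
        acc ++ [(if g == "male" || g == "female" then g else "neutral", vid)]) acc
    = acc ++ bgpPairs res fv := by
  induction fv generalizing acc with
  | nil => simp [bgpPairs]
  | cons v t ih =>
    simp only [bgpPairs, List.foldl_cons]
    rw [ih, ih]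
    split_ifs <;> simp

lemma bgpPairs_cons (res : List String) (v : List (String × String))
    (t : List (List (String × String))) :
    bgpPairs res (v :: t) =
      (let vid := ((PySem.Dict.mk v).get? "id").getD ""
       if res.contains vid then []
       else
         let g := (PySem.Dict.mk v).getD "gender" "neutral"
         [(if g == "male" || g == "female" then g else "neutral", vid)]) ++ bgpPairs res t := by
  simp only [bgpPairs, List.foldl_cons]
  rw [bgpPairs_from]
  split_ifs <;> simp only [bgpPairs, List.nil_append]

-- what stage-1 selects for one pool
def bgpSel (res : List String) (c : String) (fv : List (List (String × String))) : List String :=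
  ((bgpPairs res fv).filter (fun p => p.1 == c)).map (·.2)

-- Loop invariant: A's fold with accumulators (m, f, n) appends exactly the per-key selections of B's pair list.
lemma bgp_fold_eq (res : List String) (fv : List (List (String × String)))
    (h : ∀ v ∈ fv, ((PySem.Dict.mk v).get? "id").isSome)
    (m f n : List String) :
    fv.foldl (bgpStepA res) (m, f, n) =
      (m ++ bgpSel res "male" fv, f ++ bgpSel res "female" fv, n ++ bgpSel res "neutral" fv) := by
  induction fv generalizing m f n with
  | nil => simp [bgpSel, bgpPairs]
  | cons v t ih =>
    have hv := h v (by simp)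
    obtain ⟨vid, hvid⟩ := Option.isSome_iff_exists.mp hv
    have ht : ∀ u ∈ t, ((PySem.Dict.mk u).get? "id").isSome := fun u hu => h u (by simp [hu])
    simp only [List.foldl_cons, bgpStepA, hvid]
    by_cases hr : res.contains vid
    · have hr' : vid ∈ res := by simpa using hr
      simp only [if_pos hr, ih ht]
      simp [bgpSel, bgpPairs_cons, hvid, hr']
    · have hr' : vid ∉ res := by simpa using hr
      simp only [if_neg hr]
      by_cases hf : (PySem.Dict.mk v).getD "gender" "neutral" == "female"
      · have hg : (PySem.Dict.mk v).getD "gender" "neutral" = "female" := by simpa using hf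
        simp only [if_pos hf, ih ht]
        simp [bgpSel, bgpPairs_cons, hvid, hr', hg]
      · simp only [if_neg hf]
        by_cases hm : (PySem.Dict.mk v).getD "gender" "neutral" == "male"
        · have hg : (PySem.Dict.mk v).getD "gender" "neutral" = "male" := by simpa using hm
          simp only [if_pos hm, ih ht]
          simp [bgpSel, bgpPairs_cons, hvid, hr', hg]
        · simp only [if_neg hm, ih ht]
          have hg1 : ¬ ((PySem.Dict.mk v).getD "gender" "neutral" = "female") := by simpa using hf
          have hg2 : ¬ ((PySem.Dict.mk v).getD "gender" "neutral" = "male") := by simpa using hm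
          simp [bgpSel, bgpPairs_cons, hvid, hr', hg1, hg2]

-- ===== VERDICT (by name: the statement is the Claim_ definition above) =====
theorem build_gender_pools_py_spec : Claim_equal_build_gender_pools_py := by
  intro fv res _ hpre
  have h : ∀ v ∈ fv, ((PySem.Dict.mk v).get? "id").isSome := by
    intro v hv
    have := List.all_eq_true.mp hpre v hv
    simpa using this
  unfold Spec_build_gender_pools_py build_gender_pools_py build_gender_pools_py_alt
  rw [bgp_fold_eq res fv h [] [] []]
  simp only [PySem.Dict.getD_foldl_modify_append, PySem.Dict.getD_empty, List.nil_append,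
    bgpSel]
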